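-- pv_equiv track=rewrite | github.com/Wolfeitz/AI-Upload-Guard | ai_upload_guard.py | policy_disposition
-- ===== SOURCE A (Python) =====
-- def policy_disposition(findings, strict: bool, assume_approved_tool: bool,
--                        ip_as_prohibited: bool, hostnames_as_prohibited: bool,
--                        unknown_as_prohibited: bool):
--     labels = [f[0] for f in findings]
--
--     if ip_as_prohibited and any(lbl.startswith("Network: IP") or lbl == "Network: CIDR" for lbl in labels):
--         return "PROHIBITED"
--     if hostnames_as_prohibited and any(lbl in ("Network: hostname", "Network: URL", "Network: host:port") for lbl in labels):
--         return "PROHIBITED"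
--     if unknown_as_prohibited and any(lbl.startswith("Unknown:") for lbl in labels):
--         return "PROHIBITED"
--
--     if any(lbl.startswith(("PII:", "Regulated:", "Secret:", "Source code")) for lbl in labels):
--         return "PROHIBITED"
--
--     if any(lbl.startswith(("Client identifier", "Classification marker", "Context", "Network:", "Unknown:")) for lbl in labels):
--         return "PROHIBITED" if strict else "RESTRICTED"
--
--     return "ALLOWED_WITH_CONDITIONS" if assume_approved_tool else "ALLOWED_IF_IN_APPROVED_TOOL"
-- ===== SOURCE B (Python) =====
-- def policy_disposition(findings, strict, assume_approved_tool,
--                        ip_as_prohibited, hostnames_as_prohibited,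
--                        unknown_as_prohibited):
--     # Map-reduce: score each label with a severity (2=prohibited, 1=restricted,
--     # 0=neutral), take the maximum severity, and translate it to a disposition.
--     def severity(lbl):
--         if ((ip_as_prohibited and (lbl.startswith("Network: IP") or lbl == "Network: CIDR"))
--                 or (hostnames_as_prohibited and lbl in ("Network: hostname", "Network: URL", "Network: host:port"))
--                 or (unknown_as_prohibited and lbl.startswith("Unknown:"))
--                 or lbl.startswith(("PII:", "Regulated:", "Secret:", "Source code"))
--                 or (strict and lbl.startswith(("Client identifier", "Classification marker", "Context", "Network:", "Unknown:")))):
--             return 2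
--         if lbl.startswith(("Client identifier", "Classification marker", "Context", "Network:", "Unknown:")):
--             return 1
--         return 0
--
--     worst = max((severity(f[0]) for f in findings), default=0)
--     if worst == 2:
--         return "PROHIBITED"
--     if worst == 1:
--         return "RESTRICTED"
--     return "ALLOWED_WITH_CONDITIONS" if assume_approved_tool else "ALLOWED_IF_IN_APPROVED_TOOL"
-- ===== Notes on version B (the rewrite author's own statement) =====
-- stated objective: alternative
-- what changed: Replaces A's ordered cascade of global any() scans with a map-reduce: each label is scored with a per-label severity (2 prohibited / 1 restricted / 0 neutral, folding the option flags and strictness into the score), the maximum severity is taken over all findings, and a final table maps that maximum to the disposition string.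
import Mathlib
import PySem

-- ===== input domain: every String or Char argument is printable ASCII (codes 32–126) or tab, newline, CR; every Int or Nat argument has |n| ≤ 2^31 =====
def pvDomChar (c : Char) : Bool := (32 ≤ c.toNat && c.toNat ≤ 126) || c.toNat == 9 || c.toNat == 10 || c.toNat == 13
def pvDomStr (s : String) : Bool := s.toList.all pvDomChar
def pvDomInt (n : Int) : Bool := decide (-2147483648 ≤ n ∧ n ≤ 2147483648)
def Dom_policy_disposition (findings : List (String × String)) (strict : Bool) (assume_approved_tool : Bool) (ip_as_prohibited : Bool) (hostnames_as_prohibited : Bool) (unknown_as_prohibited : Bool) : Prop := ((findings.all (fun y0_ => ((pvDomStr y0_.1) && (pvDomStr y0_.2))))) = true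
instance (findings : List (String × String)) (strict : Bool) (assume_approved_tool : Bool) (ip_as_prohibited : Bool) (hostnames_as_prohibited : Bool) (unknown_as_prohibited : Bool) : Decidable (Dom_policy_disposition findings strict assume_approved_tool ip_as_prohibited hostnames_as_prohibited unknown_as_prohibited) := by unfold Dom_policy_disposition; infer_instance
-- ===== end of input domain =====

-- B rephrases the classification as a map-reduce: each label gets a per-label severity
-- score, the maximum score is taken over all findings, and a table maps it to the
-- disposition (objective: alternative, same O(n) cost).

-- ===== PORT A =====
-- label predicates, verbatim from A's any() conditions
def pdIsIp (lbl : String) : Bool :=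
  PySem.Str.startswith lbl "Network: IP" || lbl == "Network: CIDR"
def pdIsHost (lbl : String) : Bool :=
  lbl == "Network: hostname" || lbl == "Network: URL" || lbl == "Network: host:port"
def pdIsUnknown (lbl : String) : Bool :=
  PySem.Str.startswith lbl "Unknown:"
def pdIsHard (lbl : String) : Bool :=
  PySem.Str.startswith lbl "PII:" || PySem.Str.startswith lbl "Regulated:" ||
  PySem.Str.startswith lbl "Secret:" || PySem.Str.startswith lbl "Source code"
def pdIsSoft (lbl : String) : Bool :=
  PySem.Str.startswith lbl "Client identifier" || PySem.Str.startswith lbl "Classification marker" ||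
  PySem.Str.startswith lbl "Context" || PySem.Str.startswith lbl "Network:" ||
  PySem.Str.startswith lbl "Unknown:"

def policy_disposition (findings : List (String × String)) (strict : Bool) (assume_approved_tool : Bool) (ip_as_prohibited : Bool) (hostnames_as_prohibited : Bool) (unknown_as_prohibited : Bool) : String :=
  let labels := findings.map (fun f => f.1)
  if ip_as_prohibited && labels.any pdIsIp then "PROHIBITED"
  else if hostnames_as_prohibited && labels.any pdIsHost then "PROHIBITED"
  else if unknown_as_prohibited && labels.any pdIsUnknown then "PROHIBITED"
  else if labels.any pdIsHard then "PROHIBITED"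
  else if labels.any pdIsSoft then (if strict then "PROHIBITED" else "RESTRICTED")
  else if assume_approved_tool then "ALLOWED_WITH_CONDITIONS" else "ALLOWED_IF_IN_APPROVED_TOOL"

-- ===== PORT B =====
-- per-label severity: 2 = prohibited, 1 = restricted, 0 = neutral
def pdSeverity (strict ip host unk : Bool) (lbl : String) : Nat :=
  if (ip && pdIsIp lbl) || (host && pdIsHost lbl) || (unk && pdIsUnknown lbl)
      || pdIsHard lbl || (strict && pdIsSoft lbl) then 2
  else if pdIsSoft lbl then 1
  else 0

def policy_disposition_alt (findings : List (String × String)) (strict : Bool) (assume_approved_tool : Bool) (ip_as_prohibited : Bool) (hostnames_as_prohibited : Bool) (unknown_as_prohibited : Bool) : String :=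
  -- worst = max(severity(f[0]) for f in findings) with default 0
  let worst := findings.foldl
    (fun (m : Nat) f => max m (pdSeverity strict ip_as_prohibited hostnames_as_prohibited unknown_as_prohibited f.1)) 0
  if worst == 2 then "PROHIBITED"
  else if worst == 1 then "RESTRICTED"
  else if assume_approved_tool then "ALLOWED_WITH_CONDITIONS" else "ALLOWED_IF_IN_APPROVED_TOOL"

-- ===== PRECONDITION & SPEC =====
def Spec_policy_disposition (findings : List (String × String)) (strict : Bool) (assume_approved_tool : Bool) (ip_as_prohibited : Bool) (hostnames_as_prohibited : Bool) (unknown_as_prohibited : Bool) (out : String) : Prop := out = policy_disposition_alt findings strict assume_approved_tool ip_as_prohibited hostnames_as_prohibited unknown_as_prohibited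
instance (findings : List (String × String)) (strict : Bool) (assume_approved_tool : Bool) (ip_as_prohibited : Bool) (hostnames_as_prohibited : Bool) (unknown_as_prohibited : Bool) (out : String) : Decidable (Spec_policy_disposition findings strict assume_approved_tool ip_as_prohibited hostnames_as_prohibited unknown_as_prohibited out) := by unfold Spec_policy_disposition; infer_instance

-- ===== CLAIM (what is proved, stated in full; the proofs are below) =====
def Claim_equal_policy_disposition : Prop := ∀ (findings : List (String × String)) (strict : Bool) (assume_approved_tool : Bool) (ip_as_prohibited : Bool) (hostnames_as_prohibited : Bool) (unknown_as_prohibited : Bool), Dom_policy_disposition findings strict assume_approved_tool ip_as_prohibited hostnames_as_prohibited unknown_as_prohibited → Spec_policy_disposition findings strict assume_approved_tool ip_as_prohibited hostnames_as_prohibited unknown_as_prohibited (policy_disposition findings strict assume_approved_tool ip_as_prohibited hostnames_as_prohibited unknown_as_prohibited)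

-- ===== LEMMAS AND PROOFS =====
-- the per-label prohibited test, as one Bool
def pdP (strict ip host unk : Bool) (lbl : String) : Bool :=
  (ip && pdIsIp lbl) || (host && pdIsHost lbl) || (unk && pdIsUnknown lbl)
    || pdIsHard lbl || (strict && pdIsSoft lbl)

-- the running maximum of severities equals a two-level any() characterisation
theorem foldl_max_sev (strict ip host unk : Bool) (fs : List (String × String)) (a : Nat) :
    fs.foldl (fun (m : Nat) f => max m (pdSeverity strict ip host unk f.1)) a
    = max a (if fs.any (fun f => pdP strict ip host unk f.1) then 2
             else if fs.any (fun f => pdIsSoft f.1) then 1 else 0) := by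
  induction fs generalizing a with
  | nil => simp
  | cons hd tl ih =>
    rw [List.foldl_cons, ih]
    simp only [List.any_cons, pdSeverity, pdP]
    by_cases hp : pdP strict ip host unk hd.1 = true <;>
      by_cases hs : pdIsSoft hd.1 = true <;>
      by_cases tp : tl.any (fun f => pdP strict ip host unk f.1) = true <;>
      by_cases ts : tl.any (fun f => pdIsSoft f.1) = true <;>
      simp only [pdP] at hp tp <;>
      simp [hp, hs, tp, ts] <;> (try split_ifs) <;> omega

-- finite Bool distributivity used to split any(pdP) into A's five any() scans
theorem pd_bool_dist (ip host unk strict p1 p2 p3 p4 p5 q1 q2 q3 q4 q5 : Bool) :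
    ((ip && p1 || host && p2 || unk && p3 || p4 || strict && p5)
      || (ip && q1 || host && q2 || unk && q3 || q4 || strict && q5))
    = (ip && (p1 || q1) || host && (p2 || q2) || unk && (p3 || q3)
        || (p4 || q4) || strict && (p5 || q5)) := by
  cases ip <;> cases host <;> cases unk <;> cases strict <;> simp [Bool.or_assoc, Bool.or_comm, Bool.or_left_comm]

theorem any_pdP (strict ip host unk : Bool) (fs : List (String × String)) :
    fs.any (fun f => pdP strict ip host unk f.1)
    = (ip && fs.any (fun f => pdIsIp f.1) || host && fs.any (fun f => pdIsHost f.1)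
        || unk && fs.any (fun f => pdIsUnknown f.1) || fs.any (fun f => pdIsHard f.1)
        || strict && fs.any (fun f => pdIsSoft f.1)) := by
  induction fs with
  | nil => simp
  | cons hd tl ih =>
    simp only [List.any_cons]
    rw [ih]
    simp only [pdP]
    exact pd_bool_dist ip host unk strict _ _ _ _ _ _ _ _ _ _

-- ===== VERDICT (by name: the statement is the Claim_ definition above) =====
theorem policy_disposition_spec : Claim_equal_policy_disposition := by
  intro fs strict aat ip host unk hD
  clear hD
  unfold Spec_policy_disposition policy_disposition policy_disposition_alt
  rw [foldl_max_sev, any_pdP]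
  simp only [List.any_map, Function.comp_def]
  generalize fs.any (fun f => pdIsIp f.1) = b1
  generalize fs.any (fun f => pdIsHost f.1) = b2
  generalize fs.any (fun f => pdIsUnknown f.1) = b3
  generalize fs.any (fun f => pdIsHard f.1) = b4
  generalize fs.any (fun f => pdIsSoft f.1) = b5
  revert b1 b2 b3 b4 b5 strict aat ip host unk
  decide
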